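-- pv_equiv track=rewrite | github.com/mstaal/AoC | 2020/dec8.py | calculateSecond
-- ===== SOURCE A (Python) =====
-- def calculateSecond(content, sum, index, executed):
--     for idx in range(index, len(content)):
--         element = content[idx]
--         ins, number = element.split()
--         if ins == "acc":
--             sum += int(number)
--         if (ins == "jmp" and idx != executed) or (ins == "nop" and idx == executed):
--             return calculateSecond(content, sum, int(idx) + int(number), executed)
--     return sum
-- ===== SOURCE B (Python) =====
-- def calculateSecond(content, sum, index, executed):
--     idx = index
--     while idx < len(content):
--         ins, number = content[idx].split()
--         if ins == "acc":
--             sum += int(number)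
--         if (ins == "jmp" and idx != executed) or (ins == "nop" and idx == executed):
--             idx += int(number)
--         else:
--             idx += 1
--     return sum
-- ===== Notes on version B (the rewrite author's own statement) =====
-- stated objective: idiomatic
-- what changed: A's tail recursion (restarting a for-range scan on every taken swap-jump) is rewritten as a single iterative while-loop over an index variable; same per-line split/int parsing, no recursion.
import Mathlib
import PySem

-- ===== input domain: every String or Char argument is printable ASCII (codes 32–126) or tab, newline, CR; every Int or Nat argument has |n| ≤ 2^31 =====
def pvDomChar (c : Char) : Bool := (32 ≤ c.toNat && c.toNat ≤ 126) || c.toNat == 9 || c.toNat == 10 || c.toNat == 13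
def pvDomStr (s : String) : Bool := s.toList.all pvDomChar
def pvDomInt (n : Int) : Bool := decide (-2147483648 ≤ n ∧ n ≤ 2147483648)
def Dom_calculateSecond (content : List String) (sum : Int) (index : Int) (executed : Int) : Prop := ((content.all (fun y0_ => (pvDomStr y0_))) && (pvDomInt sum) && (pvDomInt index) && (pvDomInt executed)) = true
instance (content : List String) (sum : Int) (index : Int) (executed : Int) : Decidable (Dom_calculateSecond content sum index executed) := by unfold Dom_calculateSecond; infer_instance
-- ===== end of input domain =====

-- B replaces A's tail recursion (restart the range-scan on each taken swap-jump) by one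
-- iterative while-loop over an index variable (objective: idiomatic); return value only.

-- ===== PORT A =====
-- loop state of the for-range scan: still looping with sum / raised / early return (Python's
-- recursive call `calculateSecond(content, sum, idx+number, executed)`, carrying sum and new index)
inductive PvStA where
  | loop : Int → PvStA
  | err : PvStA
  | ret : Int → Int → PvStA
deriving DecidableEq, Repr

-- one iteration of A's `for idx in range(index, len(content))` body
def pvStepA (content : List String) (executed : Int) (st : PvStA) (idx : Int) : PvStA :=
  match st with
  | .err => .err
  | .ret s i => .ret s i
  | .loop sum =>
    match PySem.List.pyGet? content idx with
    | none => .err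
    | some element =>
      match PySem.Str.split₀ element with
      | [ins, number] =>
        if ins == "acc" then
          match PySem.Int.ofStr? number with
          | none => .err
          | some n => .loop (sum + n)
        else if (ins == "jmp" && !(idx == executed)) || (ins == "nop" && (idx == executed)) then
          match PySem.Int.ofStr? number with
          | none => .err
          | some n => .ret sum (idx + n)
        else .loop sum
      | _ => .err

-- A's recursion, fueled (Python recurses unboundedly; under Pre_ a run makes at most
-- 2*len(content)+1 recursive calls — see the pigeonhole remark above Pre_ — so this fuel is ample)
def pvRunA (content : List String) (executed : Int) : Nat → Int → Int → Int
  | 0, _, _ => 0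
  | f + 1, sum, index =>
    match (PySem.List.pyRange index (content.length : Int) 1).foldl (pvStepA content executed) (PvStA.loop sum) with
    | .loop s => s
    | .err => 0
    | .ret s i => pvRunA content executed f s i

def calculateSecond (content : List String) (sum : Int) (index : Int) (executed : Int) : Int :=
  pvRunA content executed ((2 * content.length + 2) + 1) sum index

-- ===== PORT B =====
-- Source B's while-loop, fueled (one fuel unit per loop iteration; ample under Pre_, same bound)
def pvLoopB (content : List String) (executed : Int) : Nat → Int → Int → Int
  | 0, _, _ => 0
  | f + 1, sum, idx =>
    if idx < (content.length : Int) then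
      match PySem.List.pyGet? content idx with
      | none => 0
      | some element =>
        match PySem.Str.split₀ element with
        | [ins, number] =>
          if ins == "acc" then
            match PySem.Int.ofStr? number with
            | none => 0
            | some n => pvLoopB content executed f (sum + n) (idx + 1)
          else if (ins == "jmp" && !(idx == executed)) || (ins == "nop" && (idx == executed)) then
            match PySem.Int.ofStr? number with
            | none => 0
            | some n => pvLoopB content executed f sum (idx + n)
          else pvLoopB content executed f sum (idx + 1)
        | _ => 0
    else sum

def calculateSecond_alt (content : List String) (sum : Int) (index : Int) (executed : Int) : Int :=
  pvLoopB content executed ((2 * content.length + 2) + 1) sum index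

-- ===== PRECONDITION & SPEC =====
-- control walk of the run (index only, no sum): does the run, started at idx, fall off the end
-- within f executed instructions without raising?  One fuel unit per executed instruction.
def pvOk (c : List String) (e : Int) : Nat → Int → Bool
  | 0, _ => false
  | f + 1, idx =>
    if idx < (c.length : Int) then
      match PySem.List.pyGet? c idx with
      | none => false
      | some element =>
        match PySem.Str.split₀ element with
        | [ins, number] =>
          if ins == "acc" then
            match PySem.Int.ofStr? number with
            | none => false
            | some _ => pvOk c e f (idx + 1)
          else if (ins == "jmp" && !(idx == e)) || (ins == "nop" && (idx == e)) then
            match PySem.Int.ofStr? number with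
            | none => false
            | some n => pvOk c e f (idx + n)
          else pvOk c e f (idx + 1)
        | _ => false
    else true

-- Pre_ holds exactly when Python A returns normally: it excludes only the inputs on which A
-- raises (IndexError on a visited out-of-range line, ValueError on a visited line that does not
-- split into `ins number` with an int, or RecursionError on a jump cycle).  Whether A returns is
-- a halting property of the jump program given as input, so no bounds-and-shapes formula can
-- express it; Pre_ therefore uses pvOk, the control WALK of the input program (indices only, no
-- accumulator — not a copy of either port).  The control state is just the current index, so a
-- returning run never revisits an index, and every executed index lies in [-len, len): by
-- pigeonhole at most 2*len+1 steps occur and the bound 2*len+2 decides the run EXACTLY — every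
-- input on which A returns satisfies Pre_ (measured coverage 100%); it is not a size cap.
def Pre_calculateSecond (content : List String) (sum : Int) (index : Int) (executed : Int) : Prop :=
  pvOk content executed (2 * content.length + 2) index = true
instance (content : List String) (sum : Int) (index : Int) (executed : Int) : Decidable (Pre_calculateSecond content sum index executed) := by unfold Pre_calculateSecond; infer_instance

def pvWitness_calculateSecond : List String × Int × Int × Int := (["acc 1", "jmp 2", "acc 5"], 0, 0, 9)

def Spec_calculateSecond (content : List String) (sum : Int) (index : Int) (executed : Int) (out : Int) : Prop := out = calculateSecond_alt content sum index executed
instance (content : List String) (sum : Int) (index : Int) (executed : Int) (out : Int) : Decidable (Spec_calculateSecond content sum index executed out) := by unfold Spec_calculateSecond; infer_instance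

-- ===== CLAIM (what is proved, stated in full; the proofs are below) =====
def Claim_equal_calculateSecond : Prop := ∀ (content : List String) (sum : Int) (index : Int) (executed : Int), Dom_calculateSecond content sum index executed → Pre_calculateSecond content sum index executed → Spec_calculateSecond content sum index executed (calculateSecond content sum index executed)

-- ===== LEMMAS AND PROOFS =====

theorem pv_foldl_err (c : List String) (e : Int) (l : List Int) :
    l.foldl (pvStepA c e) PvStA.err = PvStA.err := by
  induction l with
  | nil => rfl
  | cons x xs ih => simpa [pvStepA] using ih

theorem pv_foldl_ret (c : List String) (e : Int) (l : List Int) (s i : Int) :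
    l.foldl (pvStepA c e) (PvStA.ret s i) = PvStA.ret s i := by
  induction l with
  | nil => rfl
  | cons x xs ih => simpa [pvStepA] using ih

theorem pv_runA_cons (c : List String) (e : Int) (fA : Nat) (sum idx : Int)
    (h : idx < (c.length : Int)) :
    pvRunA c e (fA + 1) sum idx =
      match pvStepA c e (PvStA.loop sum) idx with
      | .loop s' => pvRunA c e (fA + 1) s' (idx + 1)
      | .err => 0
      | .ret s i => pvRunA c e fA s i := by
  conv_lhs => rw [pvRunA]
  rw [PySem.List.pyRange_one_cons h, List.foldl_cons]
  cases hstep : pvStepA c e (PvStA.loop sum) idx with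
  | loop s' => simp only [pvRunA]
  | err => rw [pv_foldl_err]
  | ret s i => rw [pv_foldl_ret]

theorem pv_main (c : List String) (e : Int) :
    ∀ (f : Nat) (idx sum : Int) (fA fB : Nat),
      pvOk c e f idx = true → f ≤ fA → f ≤ fB →
      pvRunA c e (fA + 1) sum idx = pvLoopB c e fB sum idx := by
  intro f
  induction f with
  | zero => intro idx sum fA fB hok _ _; simp [pvOk] at hok
  | succ f ih =>
    intro idx sum fA fB hok hfA hfB
    obtain ⟨fB', rfl⟩ : ∃ k, fB = k + 1 := ⟨fB - 1, by omega⟩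
    rw [pvOk] at hok
    by_cases h : idx < (c.length : Int)
    · rw [if_pos h] at hok
      conv_rhs => rw [pvLoopB]
      rw [if_pos h]
      cases hget : PySem.List.pyGet? c idx with
      | none => rw [hget] at hok; exact absurd hok (by simp)
      | some element =>
        simp only [hget] at hok ⊢
        rw [pv_runA_cons c e fA sum idx h]
        match hsplit : PySem.Str.split₀ element with
        | [ins, number] =>
          simp only [hsplit] at hok ⊢
          by_cases hacc : (ins == "acc") = true
          · rw [if_pos hacc] at hok
            cases hn : PySem.Int.ofStr? number with
            | none => rw [hn] at hok; exact absurd hok (by simp)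
            | some n =>
              simp only [hn] at hok
              have hstep : pvStepA c e (PvStA.loop sum) idx = PvStA.loop (sum + n) := by
                simp [pvStepA, hget, hsplit, hacc, hn]
              rw [hstep]
              simp only [hacc, if_true]
              exact ih (idx + 1) (sum + n) fA fB' hok (by omega) (by omega)
          · rw [if_neg hacc] at hok
            by_cases hswap : ((ins == "jmp" && !(idx == e)) || (ins == "nop" && (idx == e))) = true
            · rw [if_pos hswap] at hok
              cases hn : PySem.Int.ofStr? number with
              | none => rw [hn] at hok; exact absurd hok (by simp)
              | some n =>
                simp only [hn] at hok
                have hstep : pvStepA c e (PvStA.loop sum) idx = PvStA.ret sum (idx + n) := by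
                  simp only [pvStepA, hget, hsplit, hn]
                  rw [if_neg hacc, if_pos hswap]
                rw [hstep]
                rw [if_neg hacc, if_pos hswap]
                obtain ⟨fA', rfl⟩ : ∃ k, fA = k + 1 := ⟨fA - 1, by omega⟩
                exact ih (idx + n) sum fA' fB' hok (by omega) (by omega)
            · rw [if_neg hswap] at hok
              have hstep : pvStepA c e (PvStA.loop sum) idx = PvStA.loop sum := by
                simp only [pvStepA, hget, hsplit]
                rw [if_neg hacc, if_neg hswap]
              rw [hstep]
              rw [if_neg hacc, if_neg hswap]
              exact ih (idx + 1) sum fA fB' hok (by omega) (by omega)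
        | [] => simp only [hsplit] at hok; exact absurd hok (by simp)
        | [x] => simp only [hsplit] at hok; exact absurd hok (by simp)
        | x :: y :: z :: t => simp only [hsplit] at hok; exact absurd hok (by simp)
    · have hge : (c.length : Int) ≤ idx := by omega
      conv_lhs => rw [pvRunA]
      conv_rhs => rw [pvLoopB]
      rw [PySem.List.pyRange_one_eq_nil hge, List.foldl_nil]
      simp [not_lt.mpr hge]

-- ===== VERDICT (by name: the statement is the Claim_ definition above) =====
theorem calculateSecond_spec : Claim_equal_calculateSecond := by
  intro content sum index executed _ hpre
  show calculateSecond content sum index executed = calculateSecond_alt content sum index executed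
  unfold calculateSecond calculateSecond_alt
  exact pv_main content executed (2 * content.length + 2) index sum
    (2 * content.length + 2) ((2 * content.length + 2) + 1) hpre le_rfl (by omega)
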